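-- pv_equiv track=rewrite | github.com/codenginebd/carsscraper | utils/ConverterLandRover.py | CheckIfTelephoneNumber
-- ===== SOURCE A (Python) =====
-- def CheckIfTelephoneNumber(data):
--     data = data.strip()
--     temp = data
--     if data.startswith("Phone:"):
--         temp = data.replace("Phone:","")
--
--     if temp != "":
--         for i in temp:
--             if (i >= "0" and i <= "9") or i == "-" or i == "." or i == "(" or i == ")" or i == " ":
--                 continue
--             else:
--                 return False
--     else:
--         return False
--     return True
-- ===== SOURCE B (Python) =====
-- _ALLOWED = "0123456789.()- "
--
-- def CheckIfTelephoneNumber(data):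
--     temp = data.strip()
--     if temp.startswith("Phone:"):
--         temp = temp.replace("Phone:", "")
--     # Counting strategy: iterate over the 15-character alphabet, not over the
--     # string; every character of temp is allowed iff the occurrence counts of
--     # the allowed characters add up to the whole length.
--     return temp != "" and sum(temp.count(c) for c in _ALLOWED) == len(temp)
-- ===== Notes on version B (the rewrite author's own statement) =====
-- stated objective: alternative
-- what changed: B abandons the per-character scan with early return: it loops over the fixed 15-character allowed alphabet, counts each character's occurrences in temp via str.count, and accepts iff the counts sum to len(temp) (valid since the allowed characters are distinct), an arithmetic counting identity instead of character classification.
import Mathlib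
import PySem

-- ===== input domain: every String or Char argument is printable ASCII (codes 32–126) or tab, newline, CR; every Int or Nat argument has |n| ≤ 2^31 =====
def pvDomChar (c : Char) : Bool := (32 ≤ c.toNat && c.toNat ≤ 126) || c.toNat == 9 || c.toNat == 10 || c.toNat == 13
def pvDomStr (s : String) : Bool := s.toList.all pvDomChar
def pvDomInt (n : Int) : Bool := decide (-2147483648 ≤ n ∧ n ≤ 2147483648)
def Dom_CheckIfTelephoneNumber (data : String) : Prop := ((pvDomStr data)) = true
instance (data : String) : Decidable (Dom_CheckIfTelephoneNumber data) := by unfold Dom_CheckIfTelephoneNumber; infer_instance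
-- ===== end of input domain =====

-- B replaces A's per-character scan (early return) by a counting identity over the fixed
-- allowed alphabet: it sums temp.count(c) for the 15 allowed characters and compares with
-- len(temp); objective: alternative (same cost, different traversal).

-- ===== PORT A =====
-- A's for-loop with early 'return False', as structural recursion over the characters.
def pvChkLoopA : List Char → Bool
  | [] => true
  | c :: rest =>
      if (decide ('0' ≤ c) && decide (c ≤ '9')) || c == '-' || c == '.' || c == '(' || c == ')' || c == ' ' then
        pvChkLoopA rest
      else false

def CheckIfTelephoneNumber (data : String) : Bool :=
  let data := PySem.Str.strip data
  let temp := if PySem.Str.startswith data "Phone:" then PySem.Str.replace data "Phone:" "" else data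
  if temp ≠ "" then pvChkLoopA temp.toList else false

-- ===== PORT B =====
def pvAllowed : List Char := "0123456789.()- ".toList

-- Source B's generator-sum over the allowed alphabet; temp.count(c) with a single-character
-- needle is exactly per-character counting, ported as List.count on temp's characters,
-- and len(temp) is temp.toList.length (exact on all strings).
def CheckIfTelephoneNumber_alt (data : String) : Bool :=
  let temp := PySem.Str.strip data
  let temp := if PySem.Str.startswith temp "Phone:" then PySem.Str.replace temp "Phone:" "" else temp
  decide (temp ≠ "") && ((pvAllowed.map (fun c => temp.toList.count c)).sum == temp.toList.length)

-- ===== PRECONDITION & SPEC =====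
def Spec_CheckIfTelephoneNumber (data : String) (out : Bool) : Prop := out = CheckIfTelephoneNumber_alt data
instance (data : String) (out : Bool) : Decidable (Spec_CheckIfTelephoneNumber data out) := by unfold Spec_CheckIfTelephoneNumber; infer_instance

-- ===== CLAIM (what is proved, stated in full; the proofs are below) =====
def Claim_equal_CheckIfTelephoneNumber : Prop := ∀ (data : String), Dom_CheckIfTelephoneNumber data → Spec_CheckIfTelephoneNumber data (CheckIfTelephoneNumber data)

-- ===== LEMMAS AND PROOFS =====
-- A's per-character admission test equals membership in the allowed-character list.
theorem pv_char_eq (c : Char) :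
    ((decide ('0' ≤ c) && decide (c ≤ '9')) || c == '-' || c == '.' || c == '(' || c == ')' || c == ' ')
      = decide (c ∈ pvAllowed) := by
  have h : pvAllowed = ['0','1','2','3','4','5','6','7','8','9','.','(',')','-',' '] := rfl
  rw [h]
  apply Bool.eq_iff_iff.mpr
  simp only [Bool.or_eq_true, Bool.and_eq_true, decide_eq_true_eq, beq_iff_eq, List.mem_cons,
    List.not_mem_nil, or_false, Char.le_def, Char.ext_iff, UInt32.le_iff_toNat_le, UInt32.ext_iff]
  have h0 : ('0':Char).val.toNat = 48 := rfl
  have h9 : ('9':Char).val.toNat = 57 := rfl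
  have h1 : ('1':Char).val.toNat = 49 := rfl
  have h2 : ('2':Char).val.toNat = 50 := rfl
  have h3 : ('3':Char).val.toNat = 51 := rfl
  have h4 : ('4':Char).val.toNat = 52 := rfl
  have h5 : ('5':Char).val.toNat = 53 := rfl
  have h6 : ('6':Char).val.toNat = 54 := rfl
  have h7 : ('7':Char).val.toNat = 55 := rfl
  have h8 : ('8':Char).val.toNat = 56 := rfl
  have hd : ('.':Char).val.toNat = 46 := rfl
  have hl : ('(':Char).val.toNat = 40 := rfl
  have hr : (')':Char).val.toNat = 41 := rfl
  have hm : ('-':Char).val.toNat = 45 := rfl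
  have hs : (' ':Char).val.toNat = 32 := rfl
  rw [h0, h9, h1, h2, h3, h4, h5, h6, h7, h8, hd, hl, hr, hm, hs]
  omega

-- A's scan answers "every character is allowed".
theorem pv_left (l : List Char) :
    pvChkLoopA l = l.all (fun c => decide (c ∈ pvAllowed)) := by
  induction l with
  | nil => rfl
  | cons c rest ih =>
    rw [pvChkLoopA, pv_char_eq, List.all_cons, ih]
    by_cases h : c ∈ pvAllowed <;> simp_all

-- Summing occurrence counts over a duplicate-free alphabet counts the admitted characters.
theorem pv_sum_counts (t : List Char) (ht : t.Nodup) (l : List Char) :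
    (t.map (fun c => l.count c)).sum = l.countP (fun x => decide (x ∈ t)) := by
  induction l with
  | nil => simp
  | cons a l ih =>
    have hstep : ∀ s : List Char, (s.map (fun c => (a :: l).count c)).sum
        = (s.map (fun c => l.count c)).sum + s.count a := by
      intro s
      induction s with
      | nil => simp
      | cons b s ihs =>
        simp only [List.map_cons, List.sum_cons]
        rw [ihs, List.count_cons, List.count_cons]
        by_cases h : a = b
        · subst h; simp only [BEq.rfl, if_true]; omega
        · have h1 : (a == b) = false := beq_eq_false_iff_ne.mpr h
          have h2 : (b == a) = false := beq_eq_false_iff_ne.mpr (Ne.symm h)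
          simp only [h1, h2, Bool.false_eq_true, if_false]
          omega
    rw [hstep, ih, List.countP_cons]
    by_cases h : a ∈ t
    · simp [h, List.count_eq_one_of_mem ht h]
    · simp [h, List.count_eq_zero_of_not_mem h]

-- B's counting identity agrees with A's scan.
theorem pv_loop_eq (l : List Char) :
    pvChkLoopA l = ((pvAllowed.map (fun c => l.count c)).sum == l.length) := by
  rw [pv_left, pv_sum_counts pvAllowed (by decide) l]
  apply Bool.eq_iff_iff.mpr
  simp [List.all_eq_true, List.countP_eq_length]

-- ===== VERDICT (by name: the statement is the Claim_ definition above) =====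
theorem CheckIfTelephoneNumber_spec : Claim_equal_CheckIfTelephoneNumber := by
  intro data _
  unfold Spec_CheckIfTelephoneNumber CheckIfTelephoneNumber CheckIfTelephoneNumber_alt
  simp only []
  generalize (if PySem.Str.startswith (PySem.Str.strip data) "Phone:" = true
      then PySem.Str.replace (PySem.Str.strip data) "Phone:" "" else PySem.Str.strip data) = temp
  rw [pv_loop_eq]
  by_cases h : temp = "" <;> simp [h]
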